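-- pv_equiv track=rewrite | github.com/Nour177/RS | app2.py | compute_stagnation
-- ===== SOURCE A (Python) =====
-- from typing import Dict, List, Optional, Tuple
--
-- def compute_stagnation(improved_history: List[bool]) -> Tuple[int, int, Optional[int]]:
--     best = cur = 0
--     last_imp = None
--     for idx, imp in enumerate(improved_history, 1):
--         if imp:
--             best = max(best, cur)
--             cur  = 0
--             last_imp = idx
--         else:
--             cur += 1
--     return max(best, cur), cur, last_imp
-- ===== SOURCE B (Python) =====
-- def compute_stagnation(improved_history):
--     n = len(improved_history)
--     positions = [i for i, imp in enumerate(improved_history, 1) if imp]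
--     if not positions:
--         return n, n, None
--     gaps = [positions[0] - 1]
--     for a, b in zip(positions, positions[1:]):
--         gaps.append(b - a - 1)
--     gaps.append(n - positions[-1])
--     return max(gaps), n - positions[-1], positions[-1]
-- ===== Notes on version B (the rewrite author's own statement) =====
-- stated objective: alternative
-- what changed: Instead of maintaining running best/cur counters in one scan, B first builds the list of 1-based improvement positions and then derives the answer from the gap sizes between consecutive positions (plus leading and trailing gaps).
import Mathlib
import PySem

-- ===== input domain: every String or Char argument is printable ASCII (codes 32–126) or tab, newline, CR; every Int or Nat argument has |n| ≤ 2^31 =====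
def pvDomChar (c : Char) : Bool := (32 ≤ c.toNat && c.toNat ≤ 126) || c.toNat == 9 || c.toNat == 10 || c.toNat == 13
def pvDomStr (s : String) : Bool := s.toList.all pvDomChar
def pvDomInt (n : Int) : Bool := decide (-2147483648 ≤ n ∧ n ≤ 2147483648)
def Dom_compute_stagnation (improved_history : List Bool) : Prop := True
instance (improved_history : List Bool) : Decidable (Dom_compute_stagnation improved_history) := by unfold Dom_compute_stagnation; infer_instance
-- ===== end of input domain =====

-- B recomputes the result from the list of improvement positions and the gaps between them,
-- instead of A's single scan with running best/cur counters; same cost, different decomposition.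

-- ===== PORT A =====
-- the for-loop over enumerate(improved_history, 1) with state (best, cur, last_imp)
def goA (idx best cur : Int) (last : Option Int) : List Bool → Int × Int × Option Int
  | [] => (max best cur, cur, last)
  | b :: t =>
    if b then goA (idx + 1) (max best cur) 0 (some idx) t
    else goA (idx + 1) best (cur + 1) last t

def compute_stagnation (improved_history : List Bool) : Int × Int × Option Int :=
  goA 1 0 0 none improved_history

-- ===== PORT B =====
-- [i for i, imp in enumerate(improved_history, 1) if imp]
def posB (idx : Int) : List Bool → List Int
  | [] => []
  | b :: t => if b then idx :: posB (idx + 1) t else posB (idx + 1) t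

-- positions[-1] on a nonempty list, given head and tail
def lastOf (p : Int) : List Int → Int
  | [] => p
  | q :: qs => lastOf q qs

def compute_stagnation_alt (improved_history : List Bool) : Int × Int × Option Int :=
  let n : Int := (improved_history.length : Int)
  match posB 1 improved_history with
  | [] => (n, n, none)
  | p :: ps =>
    let lp := lastOf p ps
    -- gaps = [positions[0]-1] + [b-a-1 for a,b in zip(positions, positions[1:])] + [n - positions[-1]]
    let gaps : List Int := ((p :: ps).zip ps).map (fun ab => ab.2 - ab.1 - 1) ++ [n - lp]
    -- max(gaps): fold of max over the nonempty list
    (List.foldl max (p - 1) gaps, n - lp, some lp)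

-- ===== PRECONDITION & SPEC =====
def Spec_compute_stagnation (improved_history : List Bool) (out : Int × Int × Option Int) : Prop := out = compute_stagnation_alt improved_history
instance (improved_history : List Bool) (out : Int × Int × Option Int) : Decidable (Spec_compute_stagnation improved_history out) := by unfold Spec_compute_stagnation; infer_instance

-- ===== CLAIM (what is proved, stated in full; the proofs are below) =====
def Claim_equal_compute_stagnation : Prop := ∀ (improved_history : List Bool), Dom_compute_stagnation improved_history → Spec_compute_stagnation improved_history (compute_stagnation improved_history)

-- ===== LEMMAS AND PROOFS =====

-- intermediate shape: process the remaining positions, accumulating the running max of gaps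
def tailRes (E : Int) : Int → List Int → Int → Int × Int × Option Int
  | p, [], acc => (max acc (E - p), E - p, some p)
  | p, q :: qs, acc => tailRes E q qs (max acc (q - p - 1))

theorem goA_eq_tailRes : ∀ (t : List Bool) (idx best cur : Int) (last : Option Int),
    goA idx best cur last t =
      match posB idx t with
      | [] => (max best (cur + (t.length : Int)), cur + (t.length : Int), last)
      | p :: ps => tailRes (idx + (t.length : Int) - 1) p ps (max best (cur + (p - idx))) := by
  intro t
  induction t with
  | nil => intro idx best cur last; simp [goA, posB]
  | cons b t ih =>
    intro idx best cur last
    cases b with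
    | false =>
      simp only [goA, posB, Bool.false_eq_true, if_false]
      rw [ih]
      cases h : posB (idx + 1) t with
      | nil =>
        simp only [List.length_cons, Prod.mk.injEq]
        refine ⟨?_, ?_, trivial⟩ <;> push_cast <;> omega
      | cons p ps =>
        simp only [List.length_cons]
        have e1 : idx + 1 + (t.length : Int) - 1 = idx + ((t.length : Int) + 1) - 1 := by ring
        have e2 : max best (cur + 1 + (p - (idx + 1))) = max best (cur + (p - idx)) := by omega
        rw [e1, e2]
        push_cast
        rfl
    | true =>
      simp only [goA, posB, if_true]
      rw [ih]
      cases h : posB (idx + 1) t with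
      | nil =>
        simp only [tailRes, List.length_cons, Prod.mk.injEq]
        refine ⟨?_, ?_, trivial⟩ <;> push_cast <;> omega
      | cons p ps =>
        simp only [tailRes, List.length_cons]
        have e1 : idx + 1 + (t.length : Int) - 1 = idx + ((t.length : Int) + 1) - 1 := by ring
        have e2 : max (max best cur) (0 + (p - (idx + 1))) =
            max (max best (cur + (idx - idx))) (p - idx - 1) := by omega
        rw [e1, e2]
        push_cast
        rfl

theorem tailRes_eq_fold : ∀ (ps : List Int) (p acc E : Int),
    tailRes E p ps acc =
      (List.foldl max acc (((p :: ps).zip ps).map (fun ab => ab.2 - ab.1 - 1) ++ [E - lastOf p ps]),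
       E - lastOf p ps, some (lastOf p ps)) := by
  intro ps
  induction ps with
  | nil => intro p acc E; simp [tailRes, lastOf]
  | cons q qs ih =>
    intro p acc E
    simp only [tailRes, lastOf, List.zip_cons_cons, List.map, List.cons_append, List.foldl]
    exact ih q (max acc (q - p - 1)) E

theorem posB_head_ge : ∀ (t : List Bool) (idx p : Int) (ps : List Int),
    posB idx t = p :: ps → idx ≤ p := by
  intro t
  induction t with
  | nil => intro idx p ps h; simp [posB] at h
  | cons b t ih =>
    intro idx p ps h
    cases b with
    | true =>
      simp only [posB, if_true] at h
      injection h with h1 _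
      omega
    | false =>
      simp only [posB, Bool.false_eq_true, if_false] at h
      have := ih (idx + 1) p ps h
      omega

-- ===== VERDICT (by name: the statement is the Claim_ definition above) =====
theorem compute_stagnation_spec : Claim_equal_compute_stagnation := by
  intro h _
  unfold Spec_compute_stagnation compute_stagnation compute_stagnation_alt
  rw [goA_eq_tailRes]
  cases hp : posB 1 h with
  | nil =>
    dsimp only
    simp only [Prod.mk.injEq]
    refine ⟨?_, ?_, trivial⟩ <;> omega
  | cons p ps =>
    have hge : (1 : Int) ≤ p := posB_head_ge h 1 p ps hp
    dsimp only
    rw [tailRes_eq_fold]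
    have e1 : (1 : Int) + (h.length : Int) - 1 = (h.length : Int) := by ring
    have e2 : max 0 (0 + (p - 1)) = p - 1 := by omega
    rw [e1, e2]
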